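-- pv_equiv track=rewrite | github.com/santha22/PythonPrograms | GFG/Sorting/dominatingGeek.py | minOPs
-- ===== SOURCE A (Python) =====
-- from typing import List
--
-- def minOPs(n : int, a : List[int]) -> int:
--     # code here
--     mp = {}
--     for i in a:
--         mp[i] = 1 + mp.get(i, 0)
--
--     v = []
--     for it in mp:
--         v.append(mp[it])
--
--     v.sort()
--     sm , ans = 0, 0
--     for i in range(len(v) - 1, -1, -1):
--         sm += v[i]
--         if sm > n // 2:
--             break
--
--         ans += 1
--
--     return ans
-- ===== SOURCE B (Python) =====
-- from typing import List
--
-- def minOPs(n : int, a : List[int]) -> int: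
--     # Prefix-sum table over descending frequencies + binary search:
--     # the answer is the number of prefix sums that are <= n // 2
--     # (prefix sums are strictly increasing, so binary search finds it).
--     freq = {}
--     for x in a:
--         freq[x] = freq.get(x, 0) + 1
--     pre = []
--     s = 0
--     for f in sorted(freq.values(), reverse=True):
--         s += f
--         pre.append(s)
--     half = n // 2
--     lo, hi = 0, len(pre)
--     while lo < hi:
--         mid = (lo + hi) // 2
--         if pre[mid] <= half:
--             lo = mid + 1
--         else:
--             hi = mid
--     return lo
-- ===== Notes on version B (the rewrite author's own statement) =====
-- stated objective: alternative
-- what changed: B replaces A's greedy descending scan with early break by a staged computation: build the prefix-sum table of the descending-sorted frequencies, then locate the answer (the count of prefix sums <= n//2) by binary search, exploiting that positive frequencies make the prefix sums strictly increasing.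
import Mathlib
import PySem

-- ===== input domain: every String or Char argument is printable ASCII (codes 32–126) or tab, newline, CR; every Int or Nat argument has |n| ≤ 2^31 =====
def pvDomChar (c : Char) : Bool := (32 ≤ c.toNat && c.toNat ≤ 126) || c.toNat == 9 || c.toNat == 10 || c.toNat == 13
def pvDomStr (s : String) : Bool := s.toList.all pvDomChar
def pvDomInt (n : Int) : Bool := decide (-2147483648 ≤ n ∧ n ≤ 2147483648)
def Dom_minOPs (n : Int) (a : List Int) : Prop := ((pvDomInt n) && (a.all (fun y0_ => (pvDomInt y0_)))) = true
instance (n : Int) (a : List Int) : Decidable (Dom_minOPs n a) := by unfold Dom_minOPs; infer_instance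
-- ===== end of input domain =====

-- B replaces A's greedy scan-with-break by a prefix-sum table over the
-- descending-sorted frequencies plus a hand-written binary search
-- (objective: alternative decomposition, same asymptotic cost).

-- ===== PORT A =====
-- the 'for i in range(len(v)-1, -1, -1)' loop with break; state (sm, ans);
-- v[i] is ported with pyGet? (.getD 0 is unreachable: every generated index is in range)
def minOPsLoop (n : Int) (v : List Int) : List Int → Int → Int → Int × Int
  | [], sm, ans => (sm, ans)
  | i :: rest, sm, ans =>
    let sm := sm + (PySem.List.pyGet? v i).getD 0
    if sm > PySem.Int.floordiv n 2 then (sm, ans)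
    else minOPsLoop n v rest sm (ans + 1)

def minOPs (n : Int) (a : List Int) : Int :=
  let mp := a.foldl (fun d i => d.insert i (1 + d.getD i 0)) PySem.Dict.empty
  let v := (mp.keys).foldl (fun v it => v ++ [mp.getD it 0]) []
  let v := PySem.List.sorted v (fun y => y)
  (minOPsLoop n v (PySem.List.pyRange ((v.length : Int) - 1) (-1) (-1)) 0 0).2

-- ===== PORT B =====
-- 's = 0; for f in …: s += f; pre.append(s)'
def altPreLoop : List Int → List Int → Int → List Int × Int
  | [], pre, s => (pre, s)
  | f :: fs, pre, s => altPreLoop fs (pre ++ [s + f]) (s + f)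

-- 'while lo < hi: mid = (lo+hi)//2; …' binary search ('mid' written inline);
-- pre[mid] read with pyGet? (.getD 0 unreachable: 0 ≤ lo ≤ mid < hi ≤ len(pre) throughout)
def altBS (pre : List Int) (half : Int) (lo hi : Int) : Int :=
  if _h : lo < hi then
    if (PySem.List.pyGet? pre (PySem.Int.floordiv (lo + hi) 2)).getD 0 ≤ half then
      altBS pre half (PySem.Int.floordiv (lo + hi) 2 + 1) hi
    else altBS pre half lo (PySem.Int.floordiv (lo + hi) 2)
  else lo
termination_by (hi - lo).toNat
decreasing_by
  · have := PySem.Int.floordiv_two_mid_bounds (le_of_lt _h)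
    omega
  · have h2 : PySem.Int.floordiv (lo + hi) 2 < hi :=
      (PySem.Int.floordiv_lt_iff_lt_mul (by norm_num)).mpr (by omega)
    omega

def minOPs_alt (n : Int) (a : List Int) : Int :=
  let freq := a.foldl (fun d x => d.insert x (d.getD x 0 + 1)) PySem.Dict.empty
  let pre := (altPreLoop (PySem.List.sorted freq.values (fun y => y) true) [] 0).1
  altBS pre (PySem.Int.floordiv n 2) 0 (pre.length : Int)

-- ===== PRECONDITION & SPEC =====
def Spec_minOPs (n : Int) (a : List Int) (out : Int) : Prop := out = minOPs_alt n a
instance (n : Int) (a : List Int) (out : Int) : Decidable (Spec_minOPs n a out) := by unfold Spec_minOPs; infer_instance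

-- ===== CLAIM (what is proved, stated in full; the proofs are below) =====
def Claim_equal_minOPs : Prop := ∀ (n : Int) (a : List Int), Dom_minOPs n a → Spec_minOPs n a (minOPs n a)

-- ===== LEMMAS AND PROOFS =====

-- the "add each element, break when the sum exceeds h" pass (A's loop body, list-shaped)
def pvScan (h : Int) : List Int → Int → Int → Sum Int (Int × Int)
  | [], sm, ans => .inr (sm, ans)
  | x :: xs, sm, ans =>
    let sm := sm + x
    if sm > h then .inl ans
    else pvScan h xs sm (ans + 1)

def pvFin : Sum Int (Int × Int) → Int
  | .inl a => a
  | .inr (_, ans) => ans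

-- prefix sums of ws starting from s
def pvPre (s : Int) : List Int → List Int
  | [] => []
  | f :: fs => (s + f) :: pvPre (s + f) fs

theorem minOPsLoop_eq_pvScan (n : Int) (v : List Int) :
    ∀ (k : Nat), k ≤ v.length → ∀ (sm ans : Int),
      (minOPsLoop n v (PySem.List.pyRange ((k : Int) - 1) (-1) (-1)) sm ans).2 =
        pvFin (pvScan (PySem.Int.floordiv n 2) ((v.take k).reverse) sm ans) := by
  intro k
  induction k with
  | zero =>
    intro _ sm ans
    rw [PySem.List.pyRange_neg_one_eq_nil (by norm_num)]
    simp [minOPsLoop, pvScan, pvFin]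
  | succ k ih =>
    intro hk sm ans
    have hklt : k < v.length := by omega
    have hrange : ((k + 1 : Nat) : Int) - 1 = (k : Int) := by push_cast; ring
    rw [hrange, PySem.List.pyRange_neg_one_cons (by omega), List.take_add_one]
    have hget : PySem.List.pyGet? v (k : Int) = some v[k] := by
      rw [PySem.List.pyGet?_natCast]
      exact List.getElem?_eq_getElem hklt
    simp only [minOPsLoop, hget, Option.getD_some]
    have htk : v[k]?.toList = [v[k]] := by simp [List.getElem?_eq_getElem hklt]
    rw [htk, List.reverse_append]
    simp only [List.reverse_cons, List.reverse_nil, List.nil_append, List.cons_append,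
      pvScan]
    split_ifs with hbr
    · rfl
    · exact ih (by omega) _ _

theorem altPreLoop_eq (ws : List Int) : ∀ (pre : List Int) (s : Int),
    (altPreLoop ws pre s).1 = pre ++ pvPre s ws := by
  induction ws with
  | nil => intro pre s; simp [altPreLoop, pvPre]
  | cons f fs ih => intro pre s; simp [altPreLoop, pvPre, ih]

theorem pvPre_ge (s : Int) (ws : List Int) (hw : ∀ x ∈ ws, 0 ≤ x) :
    ∀ p ∈ pvPre s ws, s ≤ p := by
  induction ws generalizing s with
  | nil => simp [pvPre]
  | cons f fs ih =>
    intro p hp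
    have hf : 0 ≤ f := hw f (by simp)
    rw [pvPre] at hp
    rcases List.mem_cons.mp hp with rfl | hp'
    · omega
    · have := ih (s + f) (fun x hx => hw x (by simp [hx])) p hp'
      omega

theorem pvPre_pairwise (s : Int) (ws : List Int) (hw : ∀ x ∈ ws, 0 ≤ x) :
    (pvPre s ws).Pairwise (· ≤ ·) := by
  induction ws generalizing s with
  | nil => simp [pvPre]
  | cons f fs ih =>
    rw [pvPre, List.pairwise_cons]
    exact ⟨pvPre_ge (s + f) fs (fun x hx => hw x (by simp [hx])),
      ih (s + f) (fun x hx => hw x (by simp [hx]))⟩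

-- A's scan result = count of prefix sums ≤ h (positivity makes the break irrelevant)
theorem pvScan_count (h : Int) (ws : List Int) (hw : ∀ x ∈ ws, 0 ≤ x) :
    ∀ (sm ans : Int),
      pvFin (pvScan h ws sm ans) =
        ans + (((pvPre sm ws).countP (fun p => decide (p ≤ h)) : Nat) : Int) := by
  induction ws with
  | nil => intro sm ans; simp [pvScan, pvFin, pvPre]
  | cons x xs ih =>
    intro sm ans
    by_cases hbr : sm + x > h
    · have htail : (pvPre (sm + x) xs).countP (fun p => decide (p ≤ h)) = 0 := by
        rw [List.countP_eq_zero]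
        intro p hp
        have := pvPre_ge (sm + x) xs (fun y hy => hw y (by simp [hy])) p hp
        simp only [decide_eq_true_eq]
        omega
      have hx : decide ((sm + x) ≤ h) = false := by simp; omega
      simp only [pvScan, if_pos hbr]
      simp [pvFin, pvPre, htail, hx]
    · have hx : decide ((sm + x) ≤ h) = true := by simp; omega
      simp only [pvScan, if_neg hbr]
      rw [ih (fun y hy => hw y (by simp [hy])) (sm + x) (ans + 1)]
      simp only [pvPre, List.countP_cons, hx, if_true]
      push_cast
      ring

-- on a nondecreasing list, indices below countP (≤ h) are exactly those with value ≤ h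
theorem countP_char (h : Int) (pre : List Int) (hp : pre.Pairwise (· ≤ ·)) :
    ∀ (i : Nat) (hi : i < pre.length),
      (pre[i] ≤ h ↔ (i : Int) < ((pre.countP (fun p => decide (p ≤ h)) : Nat) : Int)) := by
  induction pre with
  | nil => intro i hi; simp at hi
  | cons x xs ih =>
    rcases List.pairwise_cons.mp hp with ⟨hx, hxs⟩
    intro i hi
    rw [List.countP_cons]
    by_cases hxh : x ≤ h
    · have hb : decide (x ≤ h) = true := by simp [hxh]
      rw [hb]
      cases i with
      | zero => simpa using by omega
      | succ j =>
        have hj : j < xs.length := by simpa using hi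
        have := ih hxs j hj
        simp only [List.getElem_cons_succ]
        push_cast
        constructor
        · intro hle; have := this.mp hle; omega
        · intro hlt; exact this.mpr (by omega)
    · have hczero : xs.countP (fun p => decide (p ≤ h)) = 0 := by
        rw [List.countP_eq_zero]
        intro p hpmem
        have := hx p hpmem
        simp only [decide_eq_true_eq]
        omega
      have hb : decide (x ≤ h) = false := by simp [hxh]
      rw [hb, hczero]
      cases i with
      | zero => simpa using by omega
      | succ j =>
        have hj : j < xs.length := by simpa using hi
        have hxj := hx xs[j] (List.getElem_mem hj)
        simp only [List.getElem_cons_succ]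
        constructor
        · intro hle; omega
        · intro hlt
          have h0 : (if (false = true) then (1 : Nat) else 0) = 0 := rfl
          rw [h0] at hlt
          omega
    
-- the binary search lands on the countP boundary
theorem altBS_inv (pre : List Int) (half b : Int)
    (hchar : ∀ (i : Nat) (hi : i < pre.length), (pre[i] ≤ half ↔ (i : Int) < b)) :
    ∀ (k : Nat) (lo hi : Int), (hi - lo).toNat ≤ k → 0 ≤ lo → lo ≤ b → b ≤ hi →
      hi ≤ (pre.length : Int) → altBS pre half lo hi = b := by
  intro k
  induction k with
  | zero =>
    intro lo hi hk h0 hlb hbh hhl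
    rw [altBS, dif_neg (by omega)]
    omega
  | succ k ih =>
    intro lo hi hk h0 hlb hbh hhl
    by_cases hlt : lo < hi
    · have hmid := PySem.Int.floordiv_two_mid_bounds (le_of_lt hlt)
      have hmlt' : PySem.Int.floordiv (lo + hi) 2 < hi :=
        (PySem.Int.floordiv_lt_iff_lt_mul (by norm_num)).mpr (by omega)
      set mid := PySem.Int.floordiv (lo + hi) 2 with hm
      have hmlt : mid < hi := hmlt'
      have hmp : 0 ≤ mid := by omega
      have hmn : mid.toNat < pre.length := by omega
      have hget : PySem.List.pyGet? pre mid = some (pre[mid.toNat]'hmn) := by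
        have hnc := PySem.List.pyGet?_natCast (xs := pre) (n := mid.toNat)
        rw [show ((mid.toNat : Nat) : Int) = mid by omega] at hnc
        rw [hnc]
        exact List.getElem?_eq_getElem hmn
      have hch := hchar mid.toNat hmn
      rw [altBS, dif_pos hlt, ← hm, hget, Option.getD_some]
      by_cases hc : pre[mid.toNat]'hmn ≤ half
      · rw [if_pos hc]
        have hmb : (mid.toNat : Int) < b := hch.mp hc
        exact ih (mid + 1) hi (by omega) (by omega) (by omega) hbh hhl
      · rw [if_neg hc]
        have hmb : ¬ ((mid.toNat : Int) < b) := fun hlt' => hc (hch.mpr hlt')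
        exact ih lo mid (by omega) h0 hlb (by omega) (by omega)
    · rw [altBS, dif_neg hlt]
      omega

-- both dict builds are Counter(a)
theorem dictA_eq_counter (a : List Int) :
    a.foldl (fun d i => d.insert i (1 + d.getD i 0)) PySem.Dict.empty =
      PySem.Dict.counter a := by
  have hfun : (fun (d : PySem.Dict Int Int) i => d.insert i (1 + d.getD i 0)) =
      (fun d x => d.insert x (d.getD x 0 + 1)) := by
    funext d x; rw [Int.add_comm]
  rw [hfun, PySem.Dict.foldl_insert_getD_add_one_eq_counter]

-- A's value list v is the list of counts over the distinct elements
theorem vA_eq (a : List Int) :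
    ((PySem.Dict.counter a).keys).foldl
        (fun v it => v ++ [(PySem.Dict.counter a).getD it 0]) [] =
      (PySem.Set.ofList a).map (fun k => ((a.count k : Int))) := by
  rw [PySem.List.foldl_append_singleton_eq_map, List.nil_append,
    PySem.Dict.keys_counter]
  exact List.map_congr_left fun k _ => PySem.Dict.getD_counter a k

-- B's values list is the same list
theorem valsB_eq (a : List Int) :
    (PySem.Dict.counter a).values =
      (PySem.Set.ofList a).map (fun k => ((a.count k : Int))) := by
  have h := PySem.Dict.items_counter a
  have hv : (PySem.Dict.counter a).values = ((PySem.Dict.counter a).items).map (·.2) := rfl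
  rw [hv, h, List.map_map]
  rfl

-- reverse of the ascending sort = the descending (reverse=True) sort, identity key on Int
theorem sorted_rev_eq_reverse_sorted (V : List Int) :
    PySem.List.sorted V (fun y => y) true = (PySem.List.sorted V (fun y => y)).reverse := by
  have h1 : (PySem.List.sorted V (fun y => y) true).reverse.Pairwise (· ≤ ·) := by
    rw [List.pairwise_reverse]
    exact PySem.List.sorted_pairwise_rev V (fun y => y)
  have h2 : (PySem.List.sorted V (fun y => y)).Pairwise (· ≤ ·) :=
    PySem.List.sorted_pairwise V (fun y => y)
  have hperm : (PySem.List.sorted V (fun y => y) true).reverse.Perm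
      (PySem.List.sorted V (fun y => y)) := by
    exact ((List.reverse_perm _).trans (PySem.List.sorted_perm V (fun y => y) true)).trans
      (PySem.List.sorted_perm V (fun y => y) false).symm
  have heq := PySem.List.eq_of_perm_of_pairwise_le_of_injective (fun y : Int => y)
    (fun _ _ h => h) hperm h1 h2
  rw [← heq, List.reverse_reverse]

-- main bridging theorem
theorem minOPs_eq_alt (n : Int) (a : List Int) : minOPs n a = minOPs_alt n a := by
  set V : List Int := (PySem.Set.ofList a).map (fun k => ((a.count k : Int))) with hV
  have hpos : ∀ x ∈ V, (0 : Int) ≤ x := by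
    intro x hx
    rcases List.mem_map.mp hx with ⟨k, hk, rfl⟩
    positivity
  set h : Int := PySem.Int.floordiv n 2 with hh
  set ws : List Int := (PySem.List.sorted V (fun y => y)).reverse with hws
  have hwpos : ∀ x ∈ ws, (0 : Int) ≤ x := by
    intro x hx
    rw [hws, List.mem_reverse, PySem.List.mem_sorted] at hx
    exact hpos x hx
  -- A reduces to countP of the prefix sums of ws
  have hA : minOPs n a =
      (((pvPre 0 ws).countP (fun p => decide (p ≤ h)) : Nat) : Int) := by
    simp only [minOPs]
    rw [dictA_eq_counter, vA_eq, ← hV,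
      minOPsLoop_eq_pvScan n _ (PySem.List.sorted V (fun y => y)).length (le_refl _),
      List.take_length, ← hws, pvScan_count h ws hwpos 0 0, zero_add]
  -- B reduces to the same count
  have hB : minOPs_alt n a =
      (((pvPre 0 ws).countP (fun p => decide (p ≤ h)) : Nat) : Int) := by
    simp only [minOPs_alt]
    rw [PySem.Dict.foldl_insert_getD_add_one_eq_counter, valsB_eq, ← hV,
      sorted_rev_eq_reverse_sorted, ← hws, altPreLoop_eq, List.nil_append, ← hh]
    set pre : List Int := pvPre 0 ws with hpre
    set b : Int := ((pre.countP (fun p => decide (p ≤ h)) : Nat) : Int) with hb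
    have hmono : pre.Pairwise (· ≤ ·) := pvPre_pairwise 0 ws hwpos
    have hchar := countP_char h pre hmono
    have hble : b ≤ (pre.length : Int) := by
      have := List.countP_le_length (l := pre) (p := fun p => decide (p ≤ h))
      omega
    have hb0 : 0 ≤ b := by positivity
    exact altBS_inv pre h b (fun i hi => hchar i hi) (pre.length) 0 (pre.length : Int)
      (by omega) (by omega) hb0 hble (le_refl _)
  rw [hA, hB]

-- ===== VERDICT (by name: the statement is the Claim_ definition above) =====
theorem minOPs_spec : Claim_equal_minOPs := by
  intro n a _
  unfold Spec_minOPs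
  exact minOPs_eq_alt n a
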